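-- pv_equiv track=rewrite | github.com/rajlath/rkl_codes | Hackerrank/seating.py | solve
-- ===== SOURCE A (Python) =====
-- def solve(n, m):
--
--     if n ==0 or m == 0:return 0
--     elif n%2==0 and m%2==0:
--         return solve(n//2, m//2)
--     elif n%2==0 and m%2==1:
--         return (n + solve(n//2, m//2))
--     elif n%2==1 and m%2==0:
--         return (m + solve(n//2, m//2))
--     else:
--         return (n + m - 1 + solve(n//2, m//2))
-- ===== SOURCE B (Python) =====
-- def solve(n, m):
--     total = 0
--     while n != 0 and m != 0:
--         if n % 2 == 0 and m % 2 == 0: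
--             pass
--         elif n % 2 == 0:
--             total += n
--         elif m % 2 == 0:
--             total += m
--         else:
--             total += n + m - 1
--         n //= 2
--         m //= 2
--     return total
-- ===== Notes on version B (the rewrite author's own statement) =====
-- stated objective: simpler
-- what changed: Replaces A's recursion (halving both dimensions each step) with an iterative while-loop over an additive accumulator, so there is no call stack.
import Mathlib
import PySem

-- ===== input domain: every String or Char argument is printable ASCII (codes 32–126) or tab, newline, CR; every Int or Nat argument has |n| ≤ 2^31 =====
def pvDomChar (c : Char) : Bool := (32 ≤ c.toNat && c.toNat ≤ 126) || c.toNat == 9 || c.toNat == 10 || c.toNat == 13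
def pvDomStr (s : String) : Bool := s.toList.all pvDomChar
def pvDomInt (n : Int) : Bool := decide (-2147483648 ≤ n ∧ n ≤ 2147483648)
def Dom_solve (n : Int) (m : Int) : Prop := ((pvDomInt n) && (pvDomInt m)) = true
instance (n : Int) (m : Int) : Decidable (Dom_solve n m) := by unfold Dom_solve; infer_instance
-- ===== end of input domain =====

-- B replaces A's recursion with an iterative accumulator loop (no call stack); objective: simpler.
-- Both ports use a fuel parameter only to make the (same) computation total; Pre_ excludes
-- negative inputs, on which Python A raises RecursionError (and Python B loops forever).

-- ===== PORT A =====
-- fuel ≥ n.toNat + m.toNat + 1 suffices on Pre_; it only makes the recursion total.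
def solveFuel : Nat → Int → Int → Int
  | 0, _, _ => 0
  | f + 1, n, m =>
    if n = 0 ∨ m = 0 then 0
    else if PySem.Int.mod n 2 = 0 ∧ PySem.Int.mod m 2 = 0 then
      solveFuel f (PySem.Int.floordiv n 2) (PySem.Int.floordiv m 2)
    else if PySem.Int.mod n 2 = 0 ∧ PySem.Int.mod m 2 = 1 then
      n + solveFuel f (PySem.Int.floordiv n 2) (PySem.Int.floordiv m 2)
    else if PySem.Int.mod n 2 = 1 ∧ PySem.Int.mod m 2 = 0 then
      m + solveFuel f (PySem.Int.floordiv n 2) (PySem.Int.floordiv m 2)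
    else
      n + m - 1 + solveFuel f (PySem.Int.floordiv n 2) (PySem.Int.floordiv m 2)

def solve (n : Int) (m : Int) : Int := solveFuel (n.toNat + m.toNat + 1) n m

-- ===== PORT B =====
-- the while-loop of Source B, with the same fuel bound to make it total
def solveLoop : Nat → Int → Int → Int → Int
  | 0, _, _, total => total
  | f + 1, n, m, total =>
    if n ≠ 0 ∧ m ≠ 0 then
      let total' :=
        if PySem.Int.mod n 2 = 0 ∧ PySem.Int.mod m 2 = 0 then total
        else if PySem.Int.mod n 2 = 0 then total + n
        else if PySem.Int.mod m 2 = 0 then total + m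
        else total + (n + m - 1)
      solveLoop f (PySem.Int.floordiv n 2) (PySem.Int.floordiv m 2) total'
    else total

def solve_alt (n : Int) (m : Int) : Int := solveLoop (n.toNat + m.toNat + 1) n m 0

-- ===== PRECONDITION & SPEC =====
-- Pre_ excludes inputs with BOTH n and m negative: there Python A raises RecursionError
-- (neither argument ever reaches 0 under //2) and Python B never terminates.
def Pre_solve (n : Int) (m : Int) : Prop := 0 ≤ n ∨ 0 ≤ m
instance (n : Int) (m : Int) : Decidable (Pre_solve n m) := by unfold Pre_solve; infer_instance
def pvWitness_solve : Int × Int := (7, 3)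

def Spec_solve (n : Int) (m : Int) (out : Int) : Prop := out = solve_alt n m
instance (n : Int) (m : Int) (out : Int) : Decidable (Spec_solve n m out) := by unfold Spec_solve; infer_instance

-- ===== CLAIM (what is proved, stated in full; the proofs are below) =====
def Claim_equal_solve : Prop := ∀ (n : Int) (m : Int), Dom_solve n m → Pre_solve n m → Spec_solve n m (solve n m)

-- ===== LEMMAS AND PROOFS =====

-- With the same fuel on both sides, the loop accumulates exactly what the recursion adds,
-- for every n, m (Python's mod with divisor 2 is always 0 or 1, so the branches align).
theorem loop_eq_fuel (f : Nat) : ∀ (n m total : Int),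
    solveLoop f n m total = total + solveFuel f n m := by
  induction f with
  | zero => intro n m total; simp [solveLoop, solveFuel]
  | succ f ih =>
    intro n m total
    by_cases h0 : n = 0 ∨ m = 0
    · have h0' : ¬ (n ≠ 0 ∧ m ≠ 0) := by tauto
      simp [solveLoop, solveFuel, h0, h0']
    · have h0' : n ≠ 0 ∧ m ≠ 0 := by tauto
      have En : PySem.Int.mod n 2 = n % 2 := PySem.Int.mod_eq_emod_of_pos (by omega)
      have Em : PySem.Int.mod m 2 = m % 2 := PySem.Int.mod_eq_emod_of_pos (by omega)
      have Fn : PySem.Int.floordiv n 2 = n / 2 := PySem.Int.floordiv_eq_ediv_of_pos (by omega)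
      have Fm : PySem.Int.floordiv m 2 = m / 2 := PySem.Int.floordiv_eq_ediv_of_pos (by omega)
      simp only [solveLoop, solveFuel, En, Em, Fn, Fm, if_neg h0, if_pos h0']
      rw [ih]
      generalize solveFuel f (n / 2) (m / 2) = r
      split_ifs <;> omega

-- ===== VERDICT (by name: the statement is the Claim_ definition above) =====
theorem solve_spec : Claim_equal_solve := by
  intro n m _ _
  unfold Spec_solve solve solve_alt
  rw [loop_eq_fuel, zero_add]
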